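-- pv_equiv track=rewrite | github.com/Shadowedvaca/PullAllTheThings-site | src/sv_common/guild_sync/item_source_sync.py | _armor_type_from_class_ids
-- ===== SOURCE A (Python) =====
-- _CLASS_ARMOR_TYPE: dict[int, str] = {
--     1: "plate",   # Warrior
--     2: "plate",   # Paladin
--     3: "mail",    # Hunter
--     4: "leather", # Rogue
--     5: "cloth",   # Priest
--     6: "plate",   # Death Knight
--     7: "mail",    # Shaman
--     8: "cloth",   # Mage
--     9: "cloth",   # Warlock
--     10: "leather", # Monk
--     11: "leather", # Druid
--     12: "leather", # Demon Hunter
--     13: "mail",   # Evoker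
-- }
--
-- def _armor_type_from_class_ids(class_ids: list[int]) -> str:
--     """Derive armor type from a list of eligible class IDs.
--
--     Returns 'any' if the list is empty or covers multiple armor types.
--     When all eligible classes share one armor type, returns that type.
--     """
--     if not class_ids:
--         return "any"
--     types = {_CLASS_ARMOR_TYPE.get(cid) for cid in class_ids if cid in _CLASS_ARMOR_TYPE}
--     types.discard(None)
--     if len(types) == 1:
--         return types.pop()
--     return "any"
-- ===== SOURCE B (Python) =====
-- _CLASS_ARMOR_TYPE: dict[int, str] = {
--     1: "plate",   # Warrior
--     2: "plate",   # Paladin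
--     3: "mail",    # Hunter
--     4: "leather", # Rogue
--     5: "cloth",   # Priest
--     6: "plate",   # Death Knight
--     7: "mail",    # Shaman
--     8: "cloth",   # Mage
--     9: "cloth",   # Warlock
--     10: "leather", # Monk
--     11: "leather", # Druid
--     12: "leather", # Demon Hunter
--     13: "mail",   # Evoker
-- }
--
-- def _armor_type_from_class_ids(class_ids: list[int]) -> str:
--     """Single-pass scalar accumulator: track the one armor type seen so far,
--     bail out with 'any' as soon as a second distinct type appears."""
--     common = None
--     for cid in class_ids:
--         t = _CLASS_ARMOR_TYPE.get(cid)
--         if t is None: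
--             continue
--         if common is None:
--             common = t
--         elif common != t:
--             return "any"
--     return common if common is not None else "any"
-- ===== Notes on version B (the rewrite author's own statement) =====
-- stated objective: alternative
-- what changed: Replaces building a set of armor types and inspecting its cardinality with a single-pass scalar accumulator that early-returns 'any' on the second distinct type.
import Mathlib
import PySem

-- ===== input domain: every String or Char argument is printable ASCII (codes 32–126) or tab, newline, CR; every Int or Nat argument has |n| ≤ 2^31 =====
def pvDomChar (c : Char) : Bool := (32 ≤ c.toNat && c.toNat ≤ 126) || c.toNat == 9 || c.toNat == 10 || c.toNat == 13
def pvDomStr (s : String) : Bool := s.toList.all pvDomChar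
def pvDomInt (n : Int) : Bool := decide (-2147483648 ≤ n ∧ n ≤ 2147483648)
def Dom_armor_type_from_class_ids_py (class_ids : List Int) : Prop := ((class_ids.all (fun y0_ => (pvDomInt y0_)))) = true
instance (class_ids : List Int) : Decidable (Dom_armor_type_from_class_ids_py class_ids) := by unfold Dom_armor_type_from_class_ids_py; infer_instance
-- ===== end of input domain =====

-- B replaces A's set-of-types construction with a single-pass scalar accumulator that
-- early-returns "any" on the second distinct armor type (objective: alternative decomposition).

-- the module constant _CLASS_ARMOR_TYPE (shared data, used by both ports)
def classArmorType : PySem.Dict Int String := PySem.Dict.ofList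
  [(1, "plate"), (2, "plate"), (3, "mail"), (4, "leather"), (5, "cloth"),
   (6, "plate"), (7, "mail"), (8, "cloth"), (9, "cloth"), (10, "leather"),
   (11, "leather"), (12, "leather"), (13, "mail")]

-- ===== PORT A =====
def armor_type_from_class_ids_py (class_ids : List Int) : String :=
  if class_ids = [] then "any"
  else
    -- {_CLASS_ARMOR_TYPE.get(cid) for cid in class_ids if cid in _CLASS_ARMOR_TYPE}
    let types : PySem.Set (Option String) :=
      PySem.Set.ofList ((class_ids.filter (fun cid => classArmorType.contains cid)).map
        (fun cid => classArmorType.get? cid))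
    -- types.discard(None)
    let types := PySem.Set.discard types none
    if PySem.Set.len types = 1 then
      -- types.pop(): the set has exactly one element here (and None was discarded), so
      -- pop returns that unique element — exact despite Python's unspecified set order
      ((types.head?).bind id).getD "any"
    else "any"

-- ===== PORT B =====
def altLoop (cs : List Int) (common : Option String) : String :=
  match cs with
  | [] => match common with | some u => u | none => "any"
  | c :: rest =>
    match classArmorType.get? c with
    | none => altLoop rest common
    | some t =>
      match common with
      | none => altLoop rest (some t)
      | some u => if u ≠ t then "any" else altLoop rest common

def armor_type_from_class_ids_py_alt (class_ids : List Int) : String :=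
  altLoop class_ids none

-- ===== PRECONDITION & SPEC =====
def Spec_armor_type_from_class_ids_py (class_ids : List Int) (out : String) : Prop := out = armor_type_from_class_ids_py_alt class_ids
instance (class_ids : List Int) (out : String) : Decidable (Spec_armor_type_from_class_ids_py class_ids out) := by unfold Spec_armor_type_from_class_ids_py; infer_instance

-- ===== CLAIM (what is proved, stated in full; the proofs are below) =====
def Claim_equal_armor_type_from_class_ids_py : Prop := ∀ (class_ids : List Int), Dom_armor_type_from_class_ids_py class_ids → Spec_armor_type_from_class_ids_py class_ids (armor_type_from_class_ids_py class_ids)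

-- ===== LEMMAS AND PROOFS =====

-- the common characterisation: the unique armor type among ts, else "any"
def armorSpec (ts : List String) : String :=
  match PySem.List.dedup ts with
  | [t] => t
  | _ => "any"

theorem contains_eq_isSome (d : PySem.Dict Int String) (c : Int) :
    d.contains c = (d.get? c).isSome := by
  simp [PySem.Dict.contains, PySem.Dict.get?]
  exact Eq.symm List.isSome_find?

theorem filter_map_eq (d : PySem.Dict Int String) (cs : List Int) :
    (cs.filter (fun cid => d.contains cid)).map (fun cid => d.get? cid)
      = (cs.filterMap (fun cid => d.get? cid)).map some := by
  induction cs with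
  | nil => rfl
  | cons c rest ih =>
    rw [List.filter_cons, List.filterMap_cons, contains_eq_isSome]
    cases h : d.get? c with
    | none => simpa [h] using ih
    | some t => simpa [h] using ih

theorem foldl_add_map_some (l : List String) (s : List String) :
    List.foldl PySem.Set.add (s.map some) (l.map some)
      = (List.foldl PySem.Set.add s l).map some := by
  induction l generalizing s with
  | nil => rfl
  | cons x xs ih =>
    simp only [List.map_cons, List.foldl_cons, PySem.Set.add]
    by_cases h : x ∈ s
    · simp [h, ih]
    · simpa [h, List.map_append] using ih (s ++ [x])

theorem ofList_map_some (l : List String) :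
    PySem.Set.ofList (l.map some) = (PySem.Set.ofList l).map some := by
  simpa [PySem.Set.ofList, PySem.Set.empty] using foldl_add_map_some l []

theorem discard_none_map_some (m : List String) :
    PySem.Set.discard (m.map some) (none : Option String) = m.map some := by
  simp [PySem.Set.discard, List.filter_map, Function.comp_def]

-- A computes armorSpec of the looked-up types
theorem portA_eq_spec (cs : List Int) :
    armor_type_from_class_ids_py cs = armorSpec (cs.filterMap (fun cid => classArmorType.get? cid)) := by
  by_cases hcs : cs = []
  · subst hcs; rfl
  · simp only [armor_type_from_class_ids_py, if_neg hcs, filter_map_eq, ofList_map_some,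
      discard_none_map_some]
    rw [armorSpec, PySem.List.dedup_eq_ofList]
    cases h : PySem.Set.ofList (cs.filterMap (fun cid => classArmorType.get? cid)) with
    | nil => simp [PySem.Set.len]
    | cons t m =>
      cases m with
      | nil => simp [PySem.Set.len]
      | cons t2 m2 =>
        simp only [PySem.Set.len]
        rw [if_neg (by simp [List.length_cons]; omega)]

theorem dedup_cons_cons_self (u : String) (l : List String) :
    PySem.List.dedup (u :: u :: l) = PySem.List.dedup (u :: l) := by
  simp [PySem.List.dedup, PySem.Set.ofList, PySem.Set.add, PySem.Set.empty, List.foldl]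

theorem armorSpec_two_distinct (u t : String) (l : List String) (h : u ≠ t) :
    armorSpec (u :: t :: l) = "any" := by
  have hu : u ∈ PySem.List.dedup (u :: t :: l) := (PySem.List.mem_dedup _ _).2 (by simp)
  have ht : t ∈ PySem.List.dedup (u :: t :: l) := (PySem.List.mem_dedup _ _).2 (by simp)
  rw [armorSpec]
  cases hd : PySem.List.dedup (u :: t :: l) with
  | nil => rfl
  | cons x m =>
    cases m with
    | nil =>
      rw [hd] at hu ht
      simp at hu ht
      exact absurd (hu.trans ht.symm) h
    | cons y m2 => rfl

-- B's loop with a pending type u computes armorSpec (u :: looked-up types)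
theorem altLoop_some (cs : List Int) (u : String) :
    altLoop cs (some u) = armorSpec (u :: cs.filterMap (fun cid => classArmorType.get? cid)) := by
  induction cs with
  | nil => simp [altLoop, armorSpec, PySem.List.dedup, PySem.Set.ofList, PySem.Set.add,
      PySem.Set.empty, List.foldl]
  | cons c rest ih =>
    simp only [altLoop, List.filterMap_cons]
    cases h : classArmorType.get? c with
    | none => exact ih
    | some t =>
      by_cases hut : u = t
      · subst hut
        simp only [ne_eq, not_true_eq_false, if_false, ih]
        rw [armorSpec, armorSpec, dedup_cons_cons_self]
      · simp only [ne_eq, hut, not_false_eq_true, if_true]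
        exact (armorSpec_two_distinct u t _ hut).symm

theorem altLoop_none (cs : List Int) :
    altLoop cs none = armorSpec (cs.filterMap (fun cid => classArmorType.get? cid)) := by
  induction cs with
  | nil => rfl
  | cons c rest ih =>
    simp only [altLoop, List.filterMap_cons]
    cases h : classArmorType.get? c with
    | none => exact ih
    | some t => exact altLoop_some rest t

-- ===== VERDICT (by name: the statement is the Claim_ definition above) =====
theorem armor_type_from_class_ids_py_spec : Claim_equal_armor_type_from_class_ids_py := by
  intro cs _
  unfold Spec_armor_type_from_class_ids_py armor_type_from_class_ids_py_alt
  rw [portA_eq_spec, altLoop_none]
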